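-- pv_equiv track=rewrite | github.com/DARPA-SystemicGenerativeEngineering/OpenMDAO | openmdao/utils/array_utils.py | get_local_offset_map
-- ===== SOURCE A (Python) =====
-- def get_local_offset_map(names, sizes):
--     """
--     Return a mapping of var name to local offset.
--
--     Parameters
--     ----------
--     names : list of str
--         Variable names.
--     sizes : ndarray of int
--         Local variable sizes.
--
--     Returns
--     -------
--     dict
--         Mapping of var name to local offset.
--     """
--     offsets = {}
--     start = end = 0
--     for name, size in zip(names, sizes):
--         end += size
--         if end != start:
--             offsets[name] = start
--         start = end
--     return offsets
-- ===== SOURCE B (Python) =====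
-- def get_local_offset_map(names, sizes):
--     names = list(names)
--     sizes = list(sizes)
--     n = min(len(names), len(sizes))
--
--     def solve(lo, hi):
--         # offsets for names[lo:hi], relative to position lo; returns (dict, total size)
--         if hi - lo == 1:
--             z = sizes[lo]
--             return ({names[lo]: 0} if z != 0 else {}, z)
--         mid = (lo + hi) // 2
--         left, lt = solve(lo, mid)
--         right, rt = solve(mid, hi)
--         left.update((k, v + lt) for k, v in right.items())
--         return left, lt + rt
--
--     if n == 0:
--         return {}
--     return solve(0, n)[0]
-- ===== Notes on version B (the rewrite author's own statement) =====
-- stated objective: alternative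
-- what changed: Replaces the single forward loop with a running start/end accumulator by a divide-and-conquer algorithm: each half is solved independently with offsets relative to its own start, and the halves are merged by shifting the right half's offsets by the left half's total size and dict-merging left-then-right.
import Mathlib
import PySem

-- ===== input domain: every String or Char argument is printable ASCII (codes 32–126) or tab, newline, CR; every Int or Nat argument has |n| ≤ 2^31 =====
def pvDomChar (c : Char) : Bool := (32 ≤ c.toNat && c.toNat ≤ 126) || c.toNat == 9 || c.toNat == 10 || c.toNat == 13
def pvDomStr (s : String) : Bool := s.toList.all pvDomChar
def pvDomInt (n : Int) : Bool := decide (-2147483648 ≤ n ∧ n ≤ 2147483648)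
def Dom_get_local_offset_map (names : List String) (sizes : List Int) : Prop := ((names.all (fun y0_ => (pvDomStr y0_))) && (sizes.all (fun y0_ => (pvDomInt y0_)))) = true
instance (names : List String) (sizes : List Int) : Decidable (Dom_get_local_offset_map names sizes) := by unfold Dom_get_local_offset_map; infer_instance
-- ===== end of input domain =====

-- B replaces A's single forward pass with a running start/end accumulator by a divide-and-conquer
-- algorithm: solve each half with offsets relative to its own start, then merge by shifting the
-- right half's offsets by the left half's total size (objective: alternative).


-- ===== PORT A =====
-- state: (offsets, start, end); loop body: 'end += size; if end != start: offsets[name] = start; start = end'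
def pvStepA (st : PySem.Dict String Int × Int × Int) (p : String × Int) :
    PySem.Dict String Int × Int × Int :=
  let e := st.2.2 + p.2
  let d := if e ≠ st.2.1 then st.1.insert p.1 st.2.1 else st.1
  (d, e, e)

def get_local_offset_map (names : List String) (sizes : List Int) : List (String × Int) :=
  ((names.zip sizes).foldl pvStepA (PySem.Dict.empty, 0, 0)).1.items

-- ===== PORT B =====
-- 'solve' of Source B on the zipped (name, size) segment: returns (offset dict relative to the
-- segment's start, total size of the segment); merge = left.update(right shifted by left total)
def pvSolveB : List (String × Int) → PySem.Dict String Int × Int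
  | [] => (PySem.Dict.empty, 0)          -- n == 0 top-level guard of Source B ('return {}')
  | [p] => (if p.2 ≠ 0 then PySem.Dict.empty.insert p.1 0 else PySem.Dict.empty, p.2)
  | p :: q :: t =>
    let mid := (p :: q :: t).length / 2
    let L := pvSolveB ((p :: q :: t).take mid)
    let R := pvSolveB ((p :: q :: t).drop mid)
    (L.1.update (R.1.items.map (fun r => (r.1, r.2 + L.2))), L.2 + R.2)
termination_by l => l.length
decreasing_by
  · simp [List.length_take]; omega
  · simp [List.length_drop]; omega

def get_local_offset_map_alt (names : List String) (sizes : List Int) : List (String × Int) :=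
  (pvSolveB (names.zip sizes)).1.items

-- ===== PRECONDITION & SPEC =====
def Spec_get_local_offset_map (names : List String) (sizes : List Int) (out : List (String × Int)) : Prop := out = get_local_offset_map_alt names sizes
instance (names : List String) (sizes : List Int) (out : List (String × Int)) : Decidable (Spec_get_local_offset_map names sizes out) := by unfold Spec_get_local_offset_map; infer_instance

-- ===== CLAIM (what is proved, stated in full; the proofs are below) =====
def Claim_equal_get_local_offset_map : Prop := ∀ (names : List String) (sizes : List Int), Dom_get_local_offset_map names sizes → Spec_get_local_offset_map names sizes (get_local_offset_map names sizes)

-- ===== LEMMAS AND PROOFS =====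

theorem pv_contains_false_iff (d : PySem.Dict String Int) (k : String) :
    d.contains k = false ↔ ∀ p ∈ d.items, p.1 ≠ k := by
  simp [PySem.Dict.contains, List.any_eq_false]

theorem pv_map_repl_id (k : String) (v : Int) (l : List (String × Int))
    (h : ∀ p ∈ l, p.1 ≠ k) :
    l.map (fun p => if (p.1 == k) = true then (k, v) else p) = l := by
  calc l.map (fun p => if (p.1 == k) = true then (k, v) else p)
      = l.map (fun p => p) := List.map_congr_left (by intro p hp; simp [h p hp])
    _ = l := by simp

theorem pv_ins_ins_same (d : PySem.Dict String Int) (k : String) (w v : Int) :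
    (d.insert k w).insert k v = d.insert k v := by
  apply PySem.Dict.ext
  have h2 : (d.insert k w).contains k = true := PySem.Dict.contains_insert_self d k w
  rw [PySem.Dict.items_insert_of_contains _ v h2]
  by_cases h : d.contains k = true
  · rw [PySem.Dict.items_insert_of_contains _ w h, PySem.Dict.items_insert_of_contains _ v h,
        List.map_map]
    apply List.map_congr_left
    intro p _
    by_cases hp : p.1 = k <;> simp [hp]
  · have h' : d.contains k = false := by simpa using h
    rw [PySem.Dict.items_insert_of_not_contains _ w h', PySem.Dict.items_insert_of_not_contains _ v h',
        List.map_append, pv_map_repl_id k v d.items ((pv_contains_false_iff d k).mp h')]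
    simp

theorem pv_ins_comm (d : PySem.Dict String Int) (a k : String) (w v : Int)
    (hak : a ≠ k) (hc : d.contains k = true) :
    (d.insert k v).insert a w = (d.insert a w).insert k v := by
  apply PySem.Dict.ext
  have hck : (d.insert a w).contains k = true := by
    rw [PySem.Dict.contains_insert]; simp [hc]
  by_cases ha : d.contains a = true
  · have hca : (d.insert k v).contains a = true := by
      rw [PySem.Dict.contains_insert]; simp [ha]
    rw [PySem.Dict.items_insert_of_contains _ w hca, PySem.Dict.items_insert_of_contains _ v hc,
        PySem.Dict.items_insert_of_contains _ v hck, PySem.Dict.items_insert_of_contains _ w ha,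
        List.map_map, List.map_map]
    apply List.map_congr_left
    intro p _
    have hka : ¬ k = a := fun h => hak h.symm
    by_cases hpk : p.1 = k
    · simp [hpk, hka]
    · by_cases hpa : p.1 = a
      · simp [hpa, hak]
      · simp [hpk, hpa]
  · have ha' : d.contains a = false := by simpa using ha
    have hca : (d.insert k v).contains a = false := by
      rw [PySem.Dict.contains_insert]
      simp [ha', hak]
    rw [PySem.Dict.items_insert_of_not_contains _ w hca, PySem.Dict.items_insert_of_contains _ v hc,
        PySem.Dict.items_insert_of_contains _ v hck, PySem.Dict.items_insert_of_not_contains _ w ha',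
        List.map_append]
    simp [hak]

-- pull a final overwrite of an existing key out of a fold over entries with other keys
theorem pv_fold_insert_out (k : String) (v : Int) :
    ∀ (t : List (String × Int)) (d : PySem.Dict String Int),
      d.contains k = true → (∀ p ∈ t, p.1 ≠ k) →
      t.foldl (fun acc p => acc.insert p.1 p.2) (d.insert k v)
        = (t.foldl (fun acc p => acc.insert p.1 p.2) d).insert k v := by
  intro t
  induction t with
  | nil => intro d _ _; rfl
  | cons p t ih =>
    intro d hc hk
    have hpk : p.1 ≠ k := hk p (List.mem_cons_self ..)
    have hc' : (d.insert p.1 p.2).contains k = true := by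
      rw [PySem.Dict.contains_insert]; simp [hc]
    simp only [List.foldl_cons]
    rw [pv_ins_comm d p.1 k p.2 v hpk hc]
    exact ih (d.insert p.1 p.2) hc' (fun q hq => hk q (List.mem_cons_of_mem _ hq))

-- overwriting the single entry with key k inside the folded list = folding then inserting
theorem pv_fold_map_repl (k : String) (v : Int) :
    ∀ (l : List (String × Int)) (d : PySem.Dict String Int),
      (l.map (fun p => p.1)).Nodup → k ∈ l.map (fun p => p.1) →
      (l.map (fun p => if (p.1 == k) = true then (k, v) else p)).foldl
          (fun acc p => acc.insert p.1 p.2) d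
        = (l.foldl (fun acc p => acc.insert p.1 p.2) d).insert k v := by
  intro l
  induction l with
  | nil => intro d _ hm; simp at hm
  | cons a l ih =>
    intro d hnd hm
    simp only [List.map_cons, List.nodup_cons] at hnd
    by_cases hak : a.1 = k
    · have htl : ∀ p ∈ l, p.1 ≠ k := by
        intro p hp h
        exact hnd.1 (hak ▸ h ▸ List.mem_map_of_mem hp)
      have hhd : (a.1 == k) = true := by simp [hak]
      simp only [List.map_cons, hhd, if_pos, List.foldl_cons]
      rw [pv_map_repl_id k v l htl, hak]
      rw [← pv_fold_insert_out k v l (d.insert k a.2) (PySem.Dict.contains_insert_self ..) htl,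
          pv_ins_ins_same]
    · have hm' : k ∈ l.map (fun p => p.1) := by
        rcases List.mem_cons.mp hm with h | h
        · exact absurd h.symm hak
        · exact h
      have hhd : (a.1 == k) = false := by simp [hak]
      simp only [List.map_cons, List.foldl_cons, hhd, Bool.false_eq_true, if_false]
      exact ih (d.insert a.1 a.2) hnd.2 hm'

theorem pv_update_insert_items (d g : PySem.Dict String Int) (k : String) (v : Int)
    (hg : g.keys.Nodup) :
    d.update (g.insert k v).items = (d.update g.items).insert k v := by
  have hg' : (g.items.map (fun p => p.1)).Nodup := hg
  by_cases h : g.contains k = true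
  · have hmem : k ∈ g.items.map (fun p => p.1) := by
      rcases List.any_eq_true.mp h with ⟨p, hp, hpk⟩
      exact List.mem_map.mpr ⟨p, hp, by simpa using hpk⟩
    rw [PySem.Dict.items_insert_of_contains _ v h]
    simpa [PySem.Dict.update] using pv_fold_map_repl k v g.items d hg' hmem
  · have h' : g.contains k = false := by simpa using h
    rw [PySem.Dict.items_insert_of_not_contains _ v h']
    simp [PySem.Dict.update, List.foldl_append]

-- updating by a merged dict = updating by the two parts in sequence
theorem pv_update_update : ∀ (m : List (String × Int)) (g d : PySem.Dict String Int),
    g.keys.Nodup → d.update (g.update m).items = (d.update g.items).update m := by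
  intro m
  induction m with
  | nil => intro g d _; rfl
  | cons p m ih =>
    intro g d hg
    have h1 : g.update (p :: m) = (g.insert p.1 p.2).update m := rfl
    have h2 : (d.update g.items).update (p :: m) = ((d.update g.items).insert p.1 p.2).update m := rfl
    rw [h1, h2, ih (g.insert p.1 p.2) d (PySem.Dict.nodup_keys_insert _ _ _ hg),
        pv_update_insert_items d g p.1 p.2 hg]

-- shifting all values commutes with insert / update
def pvShift (s : Int) (d : PySem.Dict String Int) : PySem.Dict String Int :=
  PySem.Dict.mk (d.items.map (fun p => (p.1, p.2 + s)))

theorem pv_contains_shift (s : Int) (d : PySem.Dict String Int) (k : String) :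
    (pvShift s d).contains k = d.contains k := by
  simp [pvShift, PySem.Dict.contains, List.any_map, Function.comp_def]

theorem pv_shift_insert (s : Int) (d : PySem.Dict String Int) (k : String) (v : Int) :
    pvShift s (d.insert k v) = (pvShift s d).insert k (v + s) := by
  apply PySem.Dict.ext
  by_cases h : d.contains k = true
  · have h2 : (pvShift s d).contains k = true := by rw [pv_contains_shift]; exact h
    show ((d.insert k v).items.map (fun p => (p.1, p.2 + s)))
        = ((pvShift s d).insert k (v + s)).items
    rw [PySem.Dict.items_insert_of_contains _ v h, PySem.Dict.items_insert_of_contains _ (v + s) h2]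
    show _ = ((d.items.map (fun p => (p.1, p.2 + s))).map
        (fun p => if (p.1 == k) = true then (k, v + s) else p))
    rw [List.map_map, List.map_map]
    apply List.map_congr_left
    intro p _
    by_cases hp : p.1 = k <;> simp [hp]
  · have h' : d.contains k = false := by simpa using h
    have h2 : (pvShift s d).contains k = false := by rw [pv_contains_shift]; exact h'
    show ((d.insert k v).items.map (fun p => (p.1, p.2 + s)))
        = ((pvShift s d).insert k (v + s)).items
    rw [PySem.Dict.items_insert_of_not_contains _ v h', PySem.Dict.items_insert_of_not_contains _ (v + s) h2]
    simp [pvShift]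

theorem pv_keys_shift (s : Int) (d : PySem.Dict String Int) : (pvShift s d).keys = d.keys := by
  simp [pvShift, PySem.Dict.keys, List.map_map, Function.comp_def]

theorem pv_shift_update (s : Int) : ∀ (m : List (String × Int)) (d : PySem.Dict String Int),
    pvShift s (d.update m) = (pvShift s d).update (m.map (fun p => (p.1, p.2 + s))) := by
  intro m
  induction m with
  | nil => intro d; rfl
  | cons p m ih =>
    intro d
    have h1 : d.update (p :: m) = (d.insert p.1 p.2).update m := rfl
    rw [h1, ih (d.insert p.1 p.2), pv_shift_insert]
    rfl

-- the unfolding equation of pvSolveB on a list of length ≥ 2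
theorem pv_solveB_cons (p q : String × Int) (t : List (String × Int)) :
    pvSolveB (p :: q :: t)
      = ((pvSolveB ((p :: q :: t).take ((p :: q :: t).length / 2))).1.update
           ((pvSolveB ((p :: q :: t).drop ((p :: q :: t).length / 2))).1.items.map
             (fun r => (r.1, r.2 + (pvSolveB ((p :: q :: t).take ((p :: q :: t).length / 2))).2))),
         (pvSolveB ((p :: q :: t).take ((p :: q :: t).length / 2))).2
           + (pvSolveB ((p :: q :: t).drop ((p :: q :: t).length / 2))).2) := by
  rw [pvSolveB]

-- keys stay duplicate-free throughout B's recursion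
theorem pv_nodup_solveB_aux : ∀ (n : Nat) (l : List (String × Int)), l.length ≤ n →
    (pvSolveB l).1.keys.Nodup := by
  intro n
  induction n with
  | zero =>
    intro l hl
    rcases l with _ | ⟨p, l⟩
    · simp [pvSolveB, PySem.Dict.empty, PySem.Dict.keys]
    · simp at hl
  | succ n ih =>
    intro l hl
    rcases l with _ | ⟨p, _ | ⟨q, t⟩⟩
    · simp [pvSolveB, PySem.Dict.empty, PySem.Dict.keys]
    · by_cases h : p.2 ≠ 0 <;>
        simp [pvSolveB, h, PySem.Dict.empty, PySem.Dict.keys, PySem.Dict.insert, PySem.Dict.contains]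
    · rw [pv_solveB_cons]
      apply PySem.Dict.nodup_keys_update
      apply ih
      simp only [List.length_take, List.length_cons] at *
      omega

theorem pv_nodup_solveB (l : List (String × Int)) : (pvSolveB l).1.keys.Nodup :=
  pv_nodup_solveB_aux l.length l le_rfl

-- update by pairwise-fresh keys appends the pairs
theorem pv_update_fresh : ∀ (l : List (String × Int)) (d : PySem.Dict String Int),
    (∀ p ∈ l, d.contains p.1 = false) → (l.map (fun p => p.1)).Nodup →
    d.update l = PySem.Dict.mk (d.items ++ l) := by
  intro l
  induction l with
  | nil => intro d _ _; apply PySem.Dict.ext; simp [PySem.Dict.update]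
  | cons p l ih =>
    intro d hdisj hnd
    simp only [List.map_cons, List.nodup_cons] at hnd
    have h1 : d.update (p :: l) = (d.insert p.1 p.2).update l := rfl
    have hins : d.insert p.1 p.2 = PySem.Dict.mk (d.items ++ [p]) := by
      apply PySem.Dict.ext
      rw [PySem.Dict.items_insert_of_not_contains _ p.2 (hdisj p (List.mem_cons_self ..))]
    have hdisj' : ∀ q ∈ l, (d.insert p.1 p.2).contains q.1 = false := by
      intro q hq
      rw [hins, PySem.Dict.contains_mk, List.any_append]
      have hq1 : (d.items.any fun r => r.1 == q.1) = false := hdisj q (List.mem_cons_of_mem _ hq)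
      have hq2 : ¬ p.1 = q.1 := by
        intro h
        exact hnd.1 (h ▸ List.mem_map_of_mem hq)
      simp [hq1, hq2]
    rw [h1, ih (d.insert p.1 p.2) hdisj' hnd.2, hins]
    simp

theorem pv_update_empty_items (g : PySem.Dict String Int) (hg : g.keys.Nodup) :
    PySem.Dict.empty.update g.items = g := by
  rw [pv_update_fresh g.items PySem.Dict.empty (by intro p _; rfl) hg]
  apply PySem.Dict.ext
  simp [PySem.Dict.empty]

-- the main invariant: A's fold from start = end = s equals B's recursive solution shifted by s
theorem pv_main : ∀ (n : Nat) (l : List (String × Int)), l.length ≤ n → ∀ (d : PySem.Dict String Int) (s : Int),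
    l.foldl pvStepA (d, s, s)
      = (d.update ((pvSolveB l).1.items.map (fun r => (r.1, r.2 + s))), s + (pvSolveB l).2, s + (pvSolveB l).2) := by
  intro n
  induction n with
  | zero =>
    intro l hl d s
    rcases l with _ | ⟨p, l⟩
    · simp [pvSolveB, PySem.Dict.update, PySem.Dict.empty]
    · simp at hl
  | succ n ih =>
    intro l hl d s
    rcases l with _ | ⟨p, _ | ⟨q, t⟩⟩
    · simp [pvSolveB, PySem.Dict.update, PySem.Dict.empty]
    · simp only [List.foldl_cons, List.foldl_nil, pvSolveB]
      unfold pvStepA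
      by_cases hz : p.2 = 0
      · simp [hz, PySem.Dict.empty, PySem.Dict.update]
      · have hne : s + p.2 ≠ s := by omega
        have hitems : (PySem.Dict.empty.insert p.1 (0 : Int)).items = [(p.1, (0 : Int))] := by
          rw [PySem.Dict.items_insert_of_not_contains _ _ (by rfl)]
          simp [PySem.Dict.empty]
        simp [hz, hne, hitems, PySem.Dict.update]
    · have hta : ((p :: q :: t).take ((p :: q :: t).length / 2)).length ≤ n := by
        simp only [List.length_take, List.length_cons] at *
        omega
      have htb : ((p :: q :: t).drop ((p :: q :: t).length / 2)).length ≤ n := by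
        simp only [List.length_drop, List.length_cons] at *
        omega
      have hsplit : (p :: q :: t)
          = (p :: q :: t).take ((p :: q :: t).length / 2)
            ++ (p :: q :: t).drop ((p :: q :: t).length / 2) :=
        (List.take_append_drop _ _).symm
      conv_lhs => rw [hsplit, List.foldl_append]
      rw [ih _ hta d s, ih _ htb _ _, pv_solveB_cons]
      have hdict :
          d.update (((pvSolveB ((p :: q :: t).take ((p :: q :: t).length / 2))).1.update
              ((pvSolveB ((p :: q :: t).drop ((p :: q :: t).length / 2))).1.items.map
                (fun r => (r.1, r.2 + (pvSolveB ((p :: q :: t).take ((p :: q :: t).length / 2))).2)))).items.map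
              (fun r => (r.1, r.2 + s)))
            = (d.update ((pvSolveB ((p :: q :: t).take ((p :: q :: t).length / 2))).1.items.map
                (fun r => (r.1, r.2 + s)))).update
              ((pvSolveB ((p :: q :: t).drop ((p :: q :: t).length / 2))).1.items.map
                (fun r => (r.1, r.2 + (s + (pvSolveB ((p :: q :: t).take ((p :: q :: t).length / 2))).2)))) := by
        show d.update ((pvShift s ((pvSolveB _).1.update _)).items) = _
        rw [pv_shift_update]
        rw [pv_update_update _ _ _ (by rw [pv_keys_shift]; exact pv_nodup_solveB _)]
        show (d.update ((pvSolveB _).1.items.map (fun r => (r.1, r.2 + s)))).update _ = _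
        congr 1
        rw [List.map_map]
        apply List.map_congr_left
        intro r _
        show (r.1, r.2 + _ + s) = (r.1, r.2 + (s + _))
        rw [Prod.mk.injEq]
        exact ⟨rfl, by ring⟩
      rw [hdict, Prod.mk.injEq, Prod.mk.injEq]
      refine ⟨rfl, by ring, by ring⟩

-- ===== VERDICT (by name: the statement is the Claim_ definition above) =====
theorem get_local_offset_map_spec : Claim_equal_get_local_offset_map := by
  intro names sizes _
  unfold Spec_get_local_offset_map get_local_offset_map get_local_offset_map_alt
  rw [pv_main (names.zip sizes).length (names.zip sizes) le_rfl PySem.Dict.empty 0]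
  have h0 : ((pvSolveB (names.zip sizes)).1.items.map (fun r => (r.1, r.2 + (0 : Int))))
      = (pvSolveB (names.zip sizes)).1.items := by
    calc _ = (pvSolveB (names.zip sizes)).1.items.map (fun r => r) :=
            List.map_congr_left (by intro p _; simp)
      _ = _ := by simp
  rw [h0, pv_update_empty_items _ (pv_nodup_solveB _)]
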